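-- pv_equiv track=rewrite | github.com/aliheadou/NLP_TagsSuggestion | webapp/functions.py | keep_hashtag_token
-- ===== SOURCE A (Python) =====
-- def keep_hashtag_token(tokens):
--     i_offset = 0
--     for i, t in enumerate(tokens):
--         i -= i_offset
--         if t == '#' and i > 0:
--             left = tokens[:i-1]
--             joined = [tokens[i - 1] + t]
--             right = tokens[i + 1:]
--             tokens = left + joined + right
--             i_offset += 1
--     return tokens
-- ===== SOURCE B (Python) =====
-- def keep_hashtag_token(tokens):
--     results = []
--     hashbuf = ''
--     for t in reversed(tokens):
--         if t == '#':
--             hashbuf = '#' + hashbuf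
--         else:
--             results.append(t + hashbuf if hashbuf else t)
--             hashbuf = ''
--     if hashbuf:
--         results.append(hashbuf)
--     results.reverse()
--     return results
-- ===== Notes on version B (the rewrite author's own statement) =====
-- stated objective: alternative
-- what changed: A repeatedly re-splices the current list (slice + concatenate) for every '#' while tracking an index offset into the original enumeration; B does one right-to-left pass that collects each run of trailing '#' tokens into a string buffer and emits every token at most once, avoiding quadratic worst-case splicing on '#'-heavy input, though on typical inputs the cost is similar.
import Mathlib
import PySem

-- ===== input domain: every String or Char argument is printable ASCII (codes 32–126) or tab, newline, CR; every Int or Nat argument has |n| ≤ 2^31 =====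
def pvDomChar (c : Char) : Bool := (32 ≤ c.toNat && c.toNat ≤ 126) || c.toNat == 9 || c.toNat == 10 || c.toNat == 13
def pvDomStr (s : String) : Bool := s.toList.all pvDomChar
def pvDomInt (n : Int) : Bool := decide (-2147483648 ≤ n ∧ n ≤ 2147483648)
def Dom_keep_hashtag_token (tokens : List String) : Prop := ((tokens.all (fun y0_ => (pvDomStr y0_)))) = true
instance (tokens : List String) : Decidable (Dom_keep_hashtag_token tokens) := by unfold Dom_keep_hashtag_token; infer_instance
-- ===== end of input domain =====

-- B replaces A's index-offset list re-splicing by one right-to-left pass with a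
-- buffer of trailing '#'s (objective: alternative algorithm, similar cost).

-- ===== PORT A =====
-- Python's `for i, t in enumerate(tokens)` iterates over a snapshot of the ORIGINAL
-- list while the variable `tokens` is reassigned; ported as recursion over that
-- original list with the running index k and the state (toks, i_offset).
def keep_hashtag_token_loop (suffix : List String) (k : Int)
    (toks : List String) (off : Int) : List String :=
  match suffix with
  | [] => toks
  | t :: rest =>
    let i : Int := k - off
    if t = "#" ∧ i > 0 then
      let left := PySem.List.slice toks none (some (i - 1))
      let joined := [PySem.List.pyGetD toks (i - 1) "" ++ t]
      let right := PySem.List.slice toks (some (i + 1)) none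
      keep_hashtag_token_loop rest (k + 1) (left ++ joined ++ right) (off + 1)
    else
      keep_hashtag_token_loop rest (k + 1) toks off

def keep_hashtag_token (tokens : List String) : List String :=
  keep_hashtag_token_loop tokens 0 tokens 0

-- ===== PORT B =====
def keep_hashtag_token_alt (tokens : List String) : List String :=
  let st := tokens.reverse.foldl
    (fun (st : List String × String) t =>
      if t = "#" then (st.1, "#" ++ st.2)
      else (st.1 ++ [if st.2 ≠ "" then t ++ st.2 else t], ""))
    ([], "")
  (if st.2 ≠ "" then st.1 ++ [st.2] else st.1).reverse

-- ===== PRECONDITION & SPEC =====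
def Spec_keep_hashtag_token (tokens : List String) (out : List String) : Prop := out = keep_hashtag_token_alt tokens
instance (tokens : List String) (out : List String) : Decidable (Spec_keep_hashtag_token tokens out) := by unfold Spec_keep_hashtag_token; infer_instance

-- ===== CLAIM (what is proved, stated in full; the proofs are below) =====
def Claim_equal_keep_hashtag_token : Prop := ∀ (tokens : List String), Dom_keep_hashtag_token tokens → Spec_keep_hashtag_token tokens (keep_hashtag_token tokens)

-- ===== LEMMAS AND PROOFS =====

def hashcat : List String → String
  | [] => ""
  | a :: l => a ++ hashcat l

-- Canonical description of the result: each token absorbs the maximal run of '#'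
-- tokens immediately following it (a leading run stands alone as one token).
def hspec : List String → List String
  | [] => []
  | t :: rest =>
      (t ++ hashcat (rest.takeWhile (fun s => decide (s = "#")))) ::
        hspec (rest.dropWhile (fun s => decide (s = "#")))
termination_by xs => xs.length
decreasing_by
  simp only [List.length_cons]
  exact Nat.lt_succ_of_le (List.length_dropWhile_le _ _)

theorem hashcat_append (l1 l2 : List String) :
    hashcat (l1 ++ l2) = hashcat l1 ++ hashcat l2 := by
  induction l1 with
  | nil => simp [hashcat]
  | cons a l ih => simp [hashcat, ih, String.append_assoc]

theorem hspec_ne_nil (t : String) (rest : List String) : hspec (t :: rest) ≠ [] := by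
  rw [hspec]; simp

theorem hspec_eq_nil_iff (xs : List String) : hspec xs = [] ↔ xs = [] := by
  cases xs with
  | nil => simp [hspec]
  | cons t rest => simp [hspec_ne_nil]

theorem takeWhile_full (rest : List String)
    (hrun : rest.dropWhile (fun s => decide (s = "#")) = []) :
    rest.takeWhile (fun s => decide (s = "#")) = rest := by
  apply List.takeWhile_eq_self_iff.mpr
  intro x hx
  exact List.dropWhile_eq_nil_iff.mp hrun x hx

-- snoc lemma: appending one token acts on the last output token.
theorem hspec_snoc (xs : List String) (t : String) :
    hspec (xs ++ [t]) =
      if t = "#" then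
        (if h : hspec xs = [] then ["#"]
         else (hspec xs).dropLast ++ [(hspec xs).getLast h ++ "#"])
      else hspec xs ++ [t] := by
  induction xs using hspec.induct with
  | case1 =>
    by_cases ht : t = "#"
    · subst ht; simp [hspec, hashcat, String.append_empty]
    · simp [hspec, ht, hashcat, List.takeWhile, List.dropWhile, ht, String.append_empty]
  | case2 a rest ih =>
    rw [List.cons_append, hspec]
    by_cases hrun : rest.dropWhile (fun s => decide (s = "#")) = []
    · have htw := takeWhile_full rest hrun
      have hlen : (rest.takeWhile (fun s => decide (s = "#"))).length = rest.length := by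
        rw [htw]
      have hsx : hspec (a :: rest)
          = [a ++ hashcat rest] := by
        rw [hspec, htw, hrun, hspec]
      by_cases ht : t = "#"
      · subst ht
        rw [List.takeWhile_append, if_pos hlen, List.dropWhile_append,
          if_pos (by simp [hrun])]
        simp only [List.takeWhile, List.dropWhile, decide_true, if_pos rfl, hsx]
        rw [hashcat_append]
        simp [hspec, hashcat, String.append_empty, String.append_assoc]
      · rw [List.takeWhile_append, if_pos hlen, List.dropWhile_append,
          if_pos (by simp [hrun])]
        have h1 : List.takeWhile (fun s => decide (s = "#")) [t] = [] := by
          simp [List.takeWhile, ht]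
        have h2 : List.dropWhile (fun s => decide (s = "#")) [t] = [t] := by
          simp [List.dropWhile, ht]
        rw [h1, h2, hsx]
        simp [hspec, ht, hashcat, List.takeWhile, List.dropWhile, String.append_empty]
    · have hlen : ¬ (rest.takeWhile (fun s => decide (s = "#"))).length = rest.length := by
        intro hl
        apply hrun
        have heq := (List.takeWhile_prefix (l := rest) (p := fun s => decide (s = "#"))).eq_of_length hl
        exact List.dropWhile_eq_nil_iff.mpr fun x hx => List.takeWhile_eq_self_iff.mp heq x hx
      rw [List.takeWhile_append, if_neg hlen, List.dropWhile_append,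
        if_neg (by simp [hrun]), ih]
      have hD : hspec (rest.dropWhile (fun s => decide (s = "#"))) ≠ [] :=
        (hspec_eq_nil_iff _).not.mpr hrun
      have hsx : hspec (a :: rest)
          = (a ++ hashcat (rest.takeWhile (fun s => decide (s = "#")))) ::
              hspec (rest.dropWhile (fun s => decide (s = "#"))) := by
        rw [hspec]
      by_cases ht : t = "#"
      · subst ht
        rw [if_pos rfl, if_pos rfl, dif_neg hD, hsx,
          dif_neg (by simp)]
        rw [List.dropLast_cons_of_ne_nil hD, List.getLast_cons hD]
        simp
      · rw [if_neg ht, if_neg ht, hsx]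
        simp
theorem hspec_snoc_nonhash (xs : List String) (t : String) (ht : t ≠ "#") :
    hspec (xs ++ [t]) = hspec xs ++ [t] := by
  rw [hspec_snoc]; simp [ht]

theorem hspec_snoc_hash (xs ys : List String) (y : String)
    (h : hspec xs = ys ++ [y]) :
    hspec (xs ++ ["#"]) = ys ++ [y ++ "#"] := by
  rw [hspec_snoc]
  have hne : hspec xs ≠ [] := by simp [h]
  simp only [if_pos rfl, dif_neg hne, h]
  simp

-- A's loop invariant: at original index |pfx| the current list is hspec pfx ++ suffix
-- and i_offset = |pfx| - |hspec pfx|.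
theorem aloop_inv (suffix : List String) : ∀ (pfx : List String),
    keep_hashtag_token_loop suffix (pfx.length : Int)
      (hspec pfx ++ suffix) ((pfx.length : Int) - ((hspec pfx).length : Int))
    = hspec (pfx ++ suffix) := by
  induction suffix with
  | nil => intro pfx; simp [keep_hashtag_token_loop]
  | cons t rest ih =>
    intro pfx
    rw [keep_hashtag_token_loop]
    by_cases ht : t = "#"
    · by_cases hp : hspec pfx = []
      · have hpfx : pfx = [] := (hspec_eq_nil_iff pfx).mp hp
        subst hpfx
        rw [if_neg (by simp [hp])]
        have := ih [t]
        simp only [List.length_cons, List.length_nil] at this ⊢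
        subst ht
        simpa [hspec, hp, List.takeWhile, List.dropWhile, hashcat,
          String.append_empty] using this
      · obtain ⟨ys, y, hys⟩ := (List.eq_nil_or_concat (hspec pfx)).resolve_left hp
        rw [List.concat_eq_append] at hys
        have hL : (hspec pfx).length = ys.length + 1 := by simp [hys]
        have hipos : ((pfx.length : Int) - ((pfx.length : Int) - ((hspec pfx).length : Int))) > 0 := by
          rw [hL]; push_cast; omega
        rw [if_pos ⟨ht, hipos⟩]
        have hi : (pfx.length : Int) - ((pfx.length : Int) - ((hspec pfx).length : Int))
            = ((hspec pfx).length : Int) := by ring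
        rw [hi]
        have hi1 : ((hspec pfx).length : Int) - 1 = ((ys.length : Nat) : Int) := by
          rw [hL]; push_cast; ring
        have hleft : PySem.List.slice (hspec pfx ++ t :: rest) none (some (((hspec pfx).length : Int) - 1)) = ys := by
          rw [hi1, PySem.List.slice_to_natCast, hys, List.append_assoc]
          simp [List.take_append]
        have hget : PySem.List.pyGetD (hspec pfx ++ t :: rest) (((hspec pfx).length : Int) - 1) "" = y := by
          rw [hi1, PySem.List.pyGetD_natCast, hys, List.append_assoc]
          simp [List.getD_eq_getElem?_getD]
        have hright : PySem.List.slice (hspec pfx ++ t :: rest) (some (((hspec pfx).length : Int) + 1)) none = rest := by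
          have hcast : ((hspec pfx).length : Int) + 1 = (((hspec pfx).length + 1 : Nat) : Int) := by
            push_cast; ring
          rw [hcast, PySem.List.slice_from_natCast]
          simp [List.drop_append]
        rw [hleft, hget, hright]
        subst ht
        have hnew : hspec (pfx ++ ["#"]) = ys ++ [y ++ "#"] := hspec_snoc_hash pfx ys y hys
        have hlen2 : (hspec (pfx ++ ["#"])).length = (hspec pfx).length := by
          rw [hnew, hys]; simp
        have hthis := ih (pfx ++ ["#"])
        rw [hnew] at hthis
        have harith : ((pfx.length : Int)) + 1 = (((pfx ++ ["#"]).length : Nat) : Int) := by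
          simp only [List.length_append, List.length_cons, List.length_nil]; push_cast; ring
        have harith2 : (pfx.length : Int) - ((hspec pfx).length : Int) + 1
            = (((pfx ++ ["#"]).length : Nat) : Int) - ((hspec (pfx ++ ["#"])).length : Int) := by
          rw [hlen2]; simp only [List.length_append, List.length_cons, List.length_nil]; push_cast; ring
        rw [harith, harith2, hnew]
        rw [show (pfx ++ ["#"]) ++ rest = pfx ++ "#" :: rest by simp] at hthis
        rw [List.append_assoc] at hthis
        simpa using hthis
    · rw [if_neg (by simp [ht])]
      have hthis := ih (pfx ++ [t])
      have hsp : hspec (pfx ++ [t]) = hspec pfx ++ [t] := hspec_snoc_nonhash pfx t ht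
      rw [hsp] at hthis
      have h1 : (pfx.length : Int) + 1 = (((pfx ++ [t]).length : Nat) : Int) := by
        simp only [List.length_append, List.length_cons, List.length_nil]; push_cast; ring
      have h2 : (pfx.length : Int) - ((hspec pfx).length : Int)
          = (((pfx ++ [t]).length : Nat) : Int) - (((hspec pfx ++ [t]).length : Nat) : Int) := by
        simp only [List.length_append, List.length_cons, List.length_nil]; push_cast; ring
      rw [h1, h2]
      rw [show (pfx ++ [t]) ++ rest = pfx ++ t :: rest by simp] at hthis
      rw [List.append_assoc] at hthis
      simpa using hthis

theorem a_eq_hspec (tokens : List String) : keep_hashtag_token tokens = hspec tokens := by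
  have h := aloop_inv tokens []
  simpa [keep_hashtag_token, hspec] using h

-- B's loop in foldr form
def bstep (t : String) (st : List String × String) : List String × String :=
  if t = "#" then (st.1, "#" ++ st.2)
  else (st.1 ++ [if st.2 ≠ "" then t ++ st.2 else t], "")

theorem b_foldr (tokens : List String) :
    tokens.reverse.foldl
      (fun (st : List String × String) t =>
        if t = "#" then (st.1, "#" ++ st.2)
        else (st.1 ++ [if st.2 ≠ "" then t ++ st.2 else t], ""))
      ([], "")
    = tokens.foldr bstep ([], "") := by
  rw [List.foldl_reverse]
  rfl

theorem b_core (tokens : List String) :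
    (tokens.foldr bstep ([], "")).2 = hashcat (tokens.takeWhile (fun s => decide (s = "#")))
    ∧ (tokens.foldr bstep ([], "")).1.reverse = hspec (tokens.dropWhile (fun s => decide (s = "#"))) := by
  induction tokens with
  | nil => simp [hspec, hashcat]
  | cons t rest ih =>
    obtain ⟨ih2, ih1⟩ := ih
    by_cases ht : t = "#"
    · subst ht
      constructor
      · simp [List.foldr, bstep, ih2, List.takeWhile, hashcat]
      · simpa [List.foldr, bstep, List.dropWhile] using ih1
    · have hbuf : (if (rest.foldr bstep ([], "")).2 ≠ "" then t ++ (rest.foldr bstep ([], "")).2 else t)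
          = t ++ (rest.foldr bstep ([], "")).2 := by
        by_cases h : (rest.foldr bstep ([], "")).2 = ""
        · simp [h, String.append_empty]
        · simp [h]
      constructor
      · simp [List.foldr, bstep, ht, List.takeWhile, hashcat]
      · simp only [List.foldr, bstep, if_neg ht, hbuf]
        rw [List.reverse_append]
        simp only [List.reverse_singleton, List.singleton_append]
        rw [ih1, ih2]
        rw [show (t :: rest).dropWhile (fun s => decide (s = "#")) = t :: rest by
          simp [List.dropWhile, ht]]
        rw [hspec]

theorem b_eq_hspec (tokens : List String) : keep_hashtag_token_alt tokens = hspec tokens := by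
  simp only [keep_hashtag_token_alt]
  rw [b_foldr]
  obtain ⟨hbuf, hres⟩ := b_core tokens
  cases tokens with
  | nil => simp [hspec] at hres ⊢
  | cons x xr =>
    by_cases hx : x = "#"
    · subst hx
      have hb : (("#" :: xr).foldr bstep ([], "")).2
          = "#" ++ hashcat (xr.takeWhile (fun s => decide (s = "#"))) := by
        rw [hbuf]; simp [List.takeWhile, hashcat]
      have hne : (("#" :: xr).foldr bstep ([], "")).2 ≠ "" := by
        rw [hb]; intro h; simpa using congrArg String.length h
      rw [if_pos hne]
      rw [List.reverse_append]
      simp only [List.reverse_singleton, List.singleton_append]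
      rw [hres, hb]
      rw [show ("#" :: xr).dropWhile (fun s => decide (s = "#")) = xr.dropWhile (fun s => decide (s = "#")) by
        simp [List.dropWhile]]
      rw [hspec]
    · have hb : (x :: xr).takeWhile (fun s => decide (s = "#")) = [] := by
        simp [List.takeWhile, hx]
      have hz : ((x :: xr).foldr bstep ([], "")).2 = "" := by
        rw [hbuf, hb]; rfl
      rw [hz]
      simp only [ne_eq, not_true_eq_false, if_false]
      rw [hres]
      rw [show (x :: xr).dropWhile (fun s => decide (s = "#")) = x :: xr by
        simp [List.dropWhile, hx]]

-- ===== VERDICT (by name: the statement is the Claim_ definition above) =====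
theorem keep_hashtag_token_spec : Claim_equal_keep_hashtag_token := by
  intro tokens _
  unfold Spec_keep_hashtag_token
  rw [a_eq_hspec, b_eq_hspec]
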